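-- pv_equiv track=rewrite | github.com/rigizer/algorithm | SWEA/D3/14413. 격자판 칠하기/격자판 칠하기.py | calc
-- ===== SOURCE A (Python) =====
-- from collections import deque
--
-- dy = [-1, 0, 1, 0]
--
-- dx = [0, 1, 0, -1]
--
-- def check(n, m, a, queue, visited):
--     while queue:
--         ny, nx, nt = queue.popleft()
--
--         for d in range(4):
--             y = ny + dy[d]
--             x = nx + dx[d]
--
--             if 0 <= y < n and 0 <= x < m and visited[y][x] == False:
--                     if nt == 0 and a[y][x] == '#':
--                         return False
--                     elif nt == 1 and a[y][x] == '.':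
--                         return False
--
--                     queue.append((y, x, 1 if nt == 0 else 0))
--                     visited[y][x] = True
--
--     return True
--
-- def calc(n, m, a):
--     queue = deque()
--     visited = [[False] * m for _ in range(n)]
--
--     for i in range(n):
--         for j in range(m):
--             if a[i][j] == '#' and visited[i][j] == False:
--                 queue.append((i, j, 0))
--                 visited[i][j] = True
--
--             elif a[i][j] == '.' and visited[i][j] == False:
--                 queue.append((i, j, 1))
--                 visited[i][j] = True
--
--             if check(n, m, a, queue, visited) == False:
--                 return False
--
--     return True
-- ===== SOURCE B (Python) =====
-- def calc(n, m, a):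
--     # Single row-major pass: every '#'/'.' cell must sit on the same checkerboard
--     # parity class; other characters are ignored (matching A's one-sided rule).
--     base = None
--     for i in range(n):
--         for j in range(m):
--             c = a[i][j]
--             if c == '#' or c == '.':
--                 p = (i + j + (1 if c == '.' else 0)) % 2
--                 if base is None:
--                     base = p
--                 elif base != p:
--                     return False
--     return True
-- ===== Notes on version B (the rewrite author's own statement) =====
-- stated objective: simpler
-- what changed: Replaced the BFS with a deque and an n-by-m visited matrix (seeded per unvisited '#'/'.' cell, re-running a check after every scanned cell) by a single row-major pass that records the checkerboard parity class of the first '#'/'.' cell and fails exactly when a later '#'/'.' cell is in the wrong class; non-'#'/'.' cells are ignored, matching A's one-sided rule.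
-- outside the precondition, e.g. on calc(3, 3, [['#', 'x'], ['#', '.', 'x'], ['#', '#']]): A returns False, B raises IndexError; on calc(2, 3, [['.', 'x', '#'], []]): A raises IndexError, B returns False
import Mathlib
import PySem

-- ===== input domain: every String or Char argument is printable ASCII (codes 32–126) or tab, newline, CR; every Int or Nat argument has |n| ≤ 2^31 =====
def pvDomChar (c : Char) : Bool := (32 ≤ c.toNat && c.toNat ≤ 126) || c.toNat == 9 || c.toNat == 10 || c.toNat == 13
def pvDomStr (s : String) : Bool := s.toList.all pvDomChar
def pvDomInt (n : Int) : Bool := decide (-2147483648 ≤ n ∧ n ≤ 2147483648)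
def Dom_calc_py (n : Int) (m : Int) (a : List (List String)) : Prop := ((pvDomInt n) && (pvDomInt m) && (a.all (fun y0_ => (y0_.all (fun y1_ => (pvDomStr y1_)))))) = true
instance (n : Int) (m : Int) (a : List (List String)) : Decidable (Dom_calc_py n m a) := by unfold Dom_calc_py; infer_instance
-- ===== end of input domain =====

-- ===== PORT A =====

-- B replaces A's per-anchor BFS with queue+visited matrix by one row-major pass that
-- checks every '#'/'.' cell against the checkerboard parity class of the first such
-- cell (objective: simpler). Python A mutates nothing observable; equivalence is
-- about the return value on well-shaped grids (see Pre_).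
-- ===== PORT A =====


def dyL : List Int := [-1, 0, 1, 0]
def dxL : List Int := [0, 1, 0, -1]

def vget (v : List (List Bool)) (y x : Int) : Bool :=
  (v.getD y.toNat []).getD x.toNat true

def vset (v : List (List Bool)) (y x : Int) : List (List Bool) :=
  v.set y.toNat ((v.getD y.toNat []).set x.toNat true)

def getCell (a : List (List String)) (y x : Int) : String :=
  (a.getD y.toNat []).getD x.toNat ""

def falseCount (v : List (List Bool)) : Nat :=
  (v.map (fun r => r.count false)).sum

def dirsLoop (n m : Int) (a : List (List String)) (ny nx nt : Int) :
    List Int → List (Int × Int × Int) → List (List Bool) →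
    Option (List (Int × Int × Int) × List (List Bool))
  | [], q, v => some (q, v)
  | d :: ds, q, v =>
    let y := ny + ((PySem.List.pyGet? dyL d).getD 0)
    let x := nx + ((PySem.List.pyGet? dxL d).getD 0)
    if 0 ≤ y ∧ y < n ∧ 0 ≤ x ∧ x < m ∧ vget v y x = false then
      if nt = 0 ∧ getCell a y x = "#" then none
      else if nt = 1 ∧ getCell a y x = "." then none
      else dirsLoop n m a ny nx nt ds (q ++ [(y, x, if nt = 0 then 1 else 0)]) (vset v y x)
    else dirsLoop n m a ny nx nt ds q v

lemma count_set_flip (l : List Bool) (i : Nat) (h : l.getD i true = false) :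
    (l.set i true).count false + 1 = l.count false := by
  induction l generalizing i with
  | nil => simp [List.getD] at h
  | cons hd tl ih =>
    cases i with
    | zero =>
      simp [List.getD] at h
      subst h
      simp [List.count_cons]
    | succ k =>
      simp [List.getD] at h
      simp [List.count_cons, ← ih k h]
      omega

lemma falseCount_set (v : List (List Bool)) (i : Nat) (r : List Bool) (hi : i < v.length) :
    falseCount (v.set i r) + (v[i].count false) = falseCount v + r.count false := by
  induction v generalizing i with
  | nil => simp at hi
  | cons hd tl ih =>
    cases i with
    | zero => simp [falseCount]; omega
    | succ k =>
      simp at hi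
      have := ih k hi
      simp [falseCount] at this ⊢
      omega

lemma falseCount_vset (v : List (List Bool)) (y x : Int) (h : vget v y x = false) :
    falseCount (vset v y x) + 1 = falseCount v := by
  unfold vget at h
  have hy : y.toNat < v.length := by
    by_contra hy
    have h0 : v.getD y.toNat [] = [] := List.getD_eq_default v [] (by omega)
    rw [h0] at h
    simp [List.getD] at h
  have hrow : v.getD y.toNat [] = v[y.toNat] := List.getD_eq_getElem v [] hy
  rw [hrow] at h
  have hflip := count_set_flip _ _ h
  have hset := falseCount_set v y.toNat (v[y.toNat].set x.toNat true) hy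
  unfold vset
  rw [hrow]
  omega

lemma dirsLoop_measure (n m : Int) (a : List (List String)) (ny nx nt : Int) :
    ∀ (ds : List Int) (q : List (Int × Int × Int)) (v : List (List Bool))
      (q' : List (Int × Int × Int)) (v' : List (List Bool)),
      dirsLoop n m a ny nx nt ds q v = some (q', v') →
      2 * falseCount v' + q'.length ≤ 2 * falseCount v + q.length := by
  intro ds
  induction ds with
  | nil => intro q v q' v' h; simp [dirsLoop] at h; simp [h.1, h.2]
  | cons d ds ih =>
    intro q v q' v' h
    simp only [dirsLoop] at h
    split at h
    · rename_i hguard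
      split at h
      · exact absurd h (by simp)
      · split at h
        · exact absurd h (by simp)
        · have := ih _ _ _ _ h
          have hflip := falseCount_vset v _ _ hguard.2.2.2.2
          simp at this
          omega
    · exact ih _ _ _ _ h

def checkGo (n m : Int) (a : List (List String)) :
    List (Int × Int × Int) → List (List Bool) → Option (List (List Bool))
  | [], v => some v
  | (ny, nx, nt) :: rest, v =>
    match h : dirsLoop n m a ny nx nt (PySem.List.pyRange 0 4 1) rest v with
    | none => none
    | some (q', v') => checkGo n m a q' v'
termination_by q v => 2 * falseCount v + q.length
decreasing_by
  have := dirsLoop_measure n m a ny nx nt _ _ _ _ _ h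
  simp at this ⊢
  omega

def cellsOf (n m : Int) : List (Int × Int) :=
  (PySem.List.pyRange 0 n 1).flatMap (fun i => (PySem.List.pyRange 0 m 1).map (fun j => (i, j)))

def calcLoop (n m : Int) (a : List (List String)) :
    List (Int × Int) → List (Int × Int × Int) → List (List Bool) → Bool
  | [], _, _ => true
  | (i, j) :: cs, q, v =>
    let cell := getCell a i j
    let s :=
      if cell = "#" ∧ vget v i j = false then (q ++ [(i, j, 0)], vset v i j)
      else if cell = "." ∧ vget v i j = false then (q ++ [(i, j, 1)], vset v i j)
      else (q, v)
    match checkGo n m a s.1 s.2 with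
    | none => false
    | some v2 => calcLoop n m a cs [] v2

def calc_py (n : Int) (m : Int) (a : List (List String)) : Bool :=
  calcLoop n m a (cellsOf n m) []
    ((List.range n.toNat).map (fun _ => List.replicate m.toNat false))

-- ===== PORT B =====
def altLoop (a : List (List String)) : List (Int × Int) → Option Int → Bool
  | [], _ => true
  | (i, j) :: cs, base =>
    let c := getCell a i j
    if c = "#" ∨ c = "." then
      let p := PySem.Int.mod (i + j + (if c = "." then 1 else 0)) 2
      match base with
      | none => altLoop a cs (some p)
      | some b => if b ≠ p then false else altLoop a cs (some b)
    else altLoop a cs base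

def calc_py_alt (n : Int) (m : Int) (a : List (List String)) : Bool :=
  altLoop a (cellsOf n m) none

-- ===== PRECONDITION & SPEC =====
-- Pre_ excludes ragged/short grids (fewer than n rows or a row among the first n
-- shorter than m): there Python A raises IndexError for most of them, though it may
-- return False early when a conflict is met before the missing cell, in a BFS-order-
-- dependent way; B scans row-major and may raise/return on different such inputs.
def Pre_calc_py (n : Int) (m : Int) (a : List (List String)) : Prop :=
  n ≤ 0 ∨ m ≤ 0 ∨ (n ≤ a.length ∧ ∀ r ∈ a.take n.toNat, m ≤ (r.length : Int))

instance (n : Int) (m : Int) (a : List (List String)) : Decidable (Pre_calc_py n m a) := by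
  unfold Pre_calc_py; infer_instance

def pvWitness_calc_py : Int × Int × List (List String) :=
  (2, 2, [["#", "."], [".", "#"]])

def Spec_calc_py (n : Int) (m : Int) (a : List (List String)) (out : Bool) : Prop := out = calc_py_alt n m a
instance (n : Int) (m : Int) (a : List (List String)) (out : Bool) : Decidable (Spec_calc_py n m a out) := by unfold Spec_calc_py; infer_instance

-- ===== CLAIM (what is proved, stated in full; the proofs are below) =====
def Claim_equal_calc_py : Prop := ∀ (n : Int) (m : Int) (a : List (List String)), Dom_calc_py n m a → Pre_calc_py n m a → Spec_calc_py n m a (calc_py n m a)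
-- ===== LEMMAS AND PROOFS =====

-- arithmetic bridge: Python mod 2 is Int emod 2
lemma pmod2 (x : Int) : PySem.Int.mod x 2 = x % 2 :=
  PySem.Int.mod_eq_emod_of_pos (by norm_num)

-- proof-side vocabulary
def inB (n m y x : Int) : Prop := 0 ≤ y ∧ y < n ∧ 0 ≤ x ∧ x < m

def markedC (c : String) : Prop := c = "#" ∨ c = "."

def fval (a : List (List String)) (i j : Int) : Int :=
  PySem.Int.mod (i + j + (if getCell a i j = "." then 1 else 0)) 2

def okb (a : List (List String)) (b i j : Int) : Prop :=
  markedC (getCell a i j) → fval a i j = b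

def shapeV (n m : Int) (v : List (List Bool)) : Prop :=
  v.length = n.toNat ∧ ∀ r ∈ v, r.length = m.toNat

def dY (d : Int) : Int := (PySem.List.pyGet? dyL d).getD 0
def dX (d : Int) : Int := (PySem.List.pyGet? dxL d).getD 0

def nbClosed (n m : Int) (v : List (List Bool)) (y x : Int) : Prop :=
  ∀ d ∈ ([0, 1, 2, 3] : List Int), inB n m (y + dY d) (x + dX d) →
    vget v (y + dY d) (x + dX d) = true

def qOK (n m : Int) (b : Int) (q : List (Int × Int × Int)) (v : List (List Bool)) : Prop :=
  ∀ e ∈ q, inB n m e.1 e.2.1 ∧ vget v e.1 e.2.1 = true ∧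
    e.2.2 = PySem.Int.mod (e.1 + e.2.1 + b) 2

def goodV (n m : Int) (a : List (List String)) (b : Int) (v : List (List Bool)) : Prop :=
  ∀ y x, inB n m y x → vget v y x = false → okb a b y x

-- vget / vset basics
lemma vget_vset_self (n m : Int) (v : List (List Bool)) (y x : Int)
    (hsh : shapeV n m v) (h : inB n m y x) : vget (vset v y x) y x = true := by
  obtain ⟨hl, hr⟩ := hsh
  obtain ⟨hy0, hyn, hx0, hxm⟩ := h
  have hy : y.toNat < v.length := by omega
  unfold vget vset
  rw [List.getD_eq_getElem (_ : List (List Bool)) [] (by simpa using hy), List.getElem_set_self]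
  have hrowlen : (v.getD y.toNat []).length = m.toNat := by
    rw [List.getD_eq_getElem v [] hy]
    exact hr _ (List.getElem_mem hy)
  rw [List.getD_eq_getElem _ true (by rw [List.length_set, hrowlen]; omega), List.getElem_set_self]

lemma vget_vset_ne (v : List (List Bool)) (y x y' x' : Int)
    (hy : 0 ≤ y) (hx : 0 ≤ x) (hy' : 0 ≤ y') (hx' : 0 ≤ x')
    (hne : ¬(y = y' ∧ x = x')) : vget (vset v y x) y' x' = vget v y' x' := by
  unfold vget vset
  by_cases hyy : y.toNat = y'.toNat
  · have hyeq : y = y' := by omega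
    subst hyeq
    have hxx : x.toNat ≠ x'.toNat := by
      intro hc
      exact hne ⟨rfl, by omega⟩
    by_cases hlen : y.toNat < v.length
    · rw [List.getD_eq_getElem (_ : List (List Bool)) [] (by simpa using hlen),
        List.getElem_set_self]
      rw [List.getD_eq_getElem?_getD, List.getElem?_set_ne hxx, ← List.getD_eq_getElem?_getD]
    · rw [List.set_eq_of_length_le (by simp at hlen ⊢; omega)]
  · have hrow : (v.set y.toNat ((v.getD y.toNat []).set x.toNat true)).getD y'.toNat [] =
        v.getD y'.toNat [] := by
      rw [List.getD_eq_getElem?_getD, List.getElem?_set_ne hyy, ← List.getD_eq_getElem?_getD]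
    rw [hrow]

lemma vget_vset_mono (v : List (List Bool)) (y x y' x' : Int)
    (hy : 0 ≤ y) (hx : 0 ≤ x) (hy' : 0 ≤ y') (hx' : 0 ≤ x')
    (hvv : vget v y x = false) (h : vget v y' x' = true) :
    vget (vset v y x) y' x' = true := by
  rw [vget_vset_ne v y x y' x' hy hx hy' hx' (by rintro ⟨rfl, rfl⟩; rw [hvv] at h; exact absurd h (by simp))]
  exact h

lemma shapeV_vset (n m : Int) (v : List (List Bool)) (y x : Int)
    (hsh : shapeV n m v) : shapeV n m (vset v y x) := by
  obtain ⟨hl, hr⟩ := hsh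
  by_cases hy : y.toNat < v.length
  · refine ⟨by simpa [vset] using hl, ?_⟩
    intro r hmem
    rcases List.mem_or_eq_of_mem_set hmem with h | h
    · exact hr r h
    · subst h
      rw [List.length_set, List.getD_eq_getElem v [] hy]
      exact hr _ (List.getElem_mem hy)
  · unfold vset
    rw [List.set_eq_of_length_le (by omega)]
    exact ⟨hl, hr⟩

lemma vget_replicate (n m y x : Int) (h : inB n m y x) :
    vget (List.replicate n.toNat (List.replicate m.toNat false)) y x = false := by
  obtain ⟨hy0, hyn, hx0, hxm⟩ := h
  unfold vget
  rw [List.getD_eq_getElem _ [] (by simp; omega), List.getElem_replicate,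
    List.getD_eq_getElem _ true (by simp; omega), List.getElem_replicate]

lemma shapeV_replicate (n m : Int) :
    shapeV n m (List.replicate n.toNat (List.replicate m.toNat false)) := by
  simp [shapeV]

lemma mem_cellsOf (n m i j : Int) : (i, j) ∈ cellsOf n m ↔ inB n m i j := by
  simp [cellsOf, List.mem_flatMap, PySem.List.mem_pyRange_one, inB]
  tauto

-- connectivity of the grid: a nonempty adjacency-closed visited set covers everything
lemma connected (n m : Int) (v : List (List Bool))
    (hcl : ∀ y x, inB n m y x → vget v y x = true → nbClosed n m v y x)
    (y0 x0 : Int) (h0 : inB n m y0 x0) (hv0 : vget v y0 x0 = true) :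
    ∀ y x, inB n m y x → vget v y x = true := by
  have key : ∀ k : Nat, ∀ y x y' x', inB n m y x → vget v y x = true → inB n m y' x' →
      (y - y').natAbs + (x - x').natAbs ≤ k → vget v y' x' = true := by
    intro k
    induction k with
    | zero =>
      intro y x y' x' h1 h2 h3 h4
      have heq : y = y' ∧ x = x' := by omega
      obtain ⟨rfl, rfl⟩ := heq
      exact h2
    | succ k ih =>
      intro y x y' x' h1 h2 h3 h4
      by_cases heq : y = y' ∧ x = x'
      · obtain ⟨rfl, rfl⟩ := heq
        exact h2
      · rcases lt_trichotomy y y' with hy | hy | hy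
        · have hstep := hcl y x h1 h2 2 (by simp)
          rw [show dY 2 = 1 from by decide, show dX 2 = 0 from by decide] at hstep
          norm_num at hstep
          have hin' : inB n m (y + 1) x := by
            obtain ⟨a1, a2, a3, a4⟩ := h1; obtain ⟨b1, b2, b3, b4⟩ := h3
            exact ⟨by omega, by omega, a3, a4⟩
          exact ih (y + 1) x y' x' hin' (hstep hin') h3 (by omega)
        · rcases lt_trichotomy x x' with hx | hx | hx
          · have hstep := hcl y x h1 h2 1 (by simp)
            rw [show dY 1 = 0 from by decide, show dX 1 = 1 from by decide] at hstep
            norm_num at hstep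
            have hin' : inB n m y (x + 1) := by
              obtain ⟨a1, a2, a3, a4⟩ := h1; obtain ⟨b1, b2, b3, b4⟩ := h3
              exact ⟨a1, a2, by omega, by omega⟩
            exact ih y (x + 1) y' x' hin' (hstep hin') h3 (by omega)
          · exact absurd ⟨hy, hx⟩ heq
          · have hstep := hcl y x h1 h2 3 (by simp)
            rw [show dY 3 = 0 from by decide, show dX 3 = -1 from by decide] at hstep
            norm_num at hstep
            have hin' : inB n m y (x - 1) := by
              obtain ⟨a1, a2, a3, a4⟩ := h1; obtain ⟨b1, b2, b3, b4⟩ := h3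
              exact ⟨a1, a2, by omega, by omega⟩
            have hv' := hstep (by rw [show x + -1 = x - 1 from by ring]; exact hin')
            rw [show x + -1 = x - 1 from by ring] at hv'
            exact ih y (x - 1) y' x' hin' hv' h3 (by omega)
        · have hstep := hcl y x h1 h2 0 (by simp)
          rw [show dY 0 = -1 from by decide, show dX 0 = 0 from by decide] at hstep
          norm_num at hstep
          have hin' : inB n m (y - 1) x := by
            obtain ⟨a1, a2, a3, a4⟩ := h1; obtain ⟨b1, b2, b3, b4⟩ := h3
            exact ⟨by omega, by omega, a3, a4⟩
          have hv' := hstep (by rw [show y + -1 = y - 1 from by ring]; exact hin')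
          rw [show y + -1 = y - 1 from by ring] at hv'
          exact ih (y - 1) x y' x' hin' hv' h3 (by omega)
  intro y x hin
  exact key ((y0 - y).natAbs + (x0 - x).natAbs) y0 x0 y x h0 hv0 hin le_rfl

lemma dirsLoop_main (n m : Int) (a : List (List String)) (b ny nx nt : Int)
    (hb : 0 ≤ b ∧ b < 2) (hny : inB n m ny nx) (hnt : nt = PySem.Int.mod (ny + nx + b) 2) :
    ∀ (ds : List Int) (q : List (Int × Int × Int)) (v : List (List Bool)),
    (∀ d ∈ ds, d ∈ ([0, 1, 2, 3] : List Int)) →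
    shapeV n m v →
    qOK n m b q v →
    vget v ny nx = true →
    (∀ y x, inB n m y x → vget v y x = true →
      (y = ny ∧ x = nx) ∨ (∃ t, (y, x, t) ∈ q) ∨ nbClosed n m v y x) →
    (∀ d ∈ ([0, 1, 2, 3] : List Int), d ∉ ds → inB n m (ny + dY d) (nx + dX d) →
      vget v (ny + dY d) (nx + dX d) = true) →
    ( (dirsLoop n m a ny nx nt ds q v = none ∧
        ∃ y x, inB n m y x ∧ vget v y x = false ∧ ¬ okb a b y x)
      ∨ (∃ q' v', dirsLoop n m a ny nx nt ds q v = some (q', v') ∧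
          shapeV n m v' ∧ qOK n m b q' v' ∧
          (∀ y x, 0 ≤ y → 0 ≤ x → vget v y x = true → vget v' y x = true) ∧
          (∀ y x, inB n m y x → vget v' y x = true →
            (y = ny ∧ x = nx) ∨ (∃ t, (y, x, t) ∈ q') ∨ nbClosed n m v' y x) ∧
          (∀ d ∈ ([0, 1, 2, 3] : List Int), inB n m (ny + dY d) (nx + dX d) →
            vget v' (ny + dY d) (nx + dX d) = true) ∧
          (∀ y x, 0 ≤ y → 0 ≤ x → vget v' y x = false → vget v y x = false) ∧
          (∀ y x, inB n m y x → vget v y x = false → vget v' y x = true → okb a b y x)) ) := by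
  intro ds
  induction ds with
  | nil =>
    intro q v _hds hsh hq hvny hcl hpend
    right
    exact ⟨q, v, by simp [dirsLoop], hsh, hq, fun _ _ _ _ h => h, hcl,
      (fun d hd hin => hpend d hd (by simp) hin), fun _ _ _ _ h => h,
      fun y x _ h1 h2 => absurd h1 (by simp [h2])⟩
  | cons d ds ih =>
    intro q v hds hsh hq hvny hcl hpend
    have hd4 : d ∈ ([0, 1, 2, 3] : List Int) := hds d (by simp)
    have hdc : d = 0 ∨ d = 1 ∨ d = 2 ∨ d = 3 := by simpa using hd4
    have hsum : dY d + dX d = 1 ∨ dY d + dX d = -1 := by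
      rcases hdc with rfl | rfl | rfl | rfl <;> decide
    have hntb : nt = (ny + nx + b) % 2 := by rw [hnt, pmod2]
    have hnt01 : nt = 0 ∨ nt = 1 := by omega
    simp only [dirsLoop]
    rw [show ((PySem.List.pyGet? dyL d).getD 0) = dY d from rfl,
      show ((PySem.List.pyGet? dxL d).getD 0) = dX d from rfl]
    by_cases hg : (0 ≤ ny + dY d ∧ ny + dY d < n ∧ 0 ≤ nx + dX d ∧ nx + dX d < m ∧
        vget v (ny + dY d) (nx + dX d) = false)
    · rw [if_pos hg]
      have hinB : inB n m (ny + dY d) (nx + dX d) := ⟨hg.1, hg.2.1, hg.2.2.1, hg.2.2.2.1⟩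
      have hunv : vget v (ny + dY d) (nx + dX d) = false := hg.2.2.2.2
      by_cases hf1 : nt = 0 ∧ getCell a (ny + dY d) (nx + dX d) = "#"
      · rw [if_pos hf1]
        left
        refine ⟨rfl, ny + dY d, nx + dX d, hinB, hunv, ?_⟩
        intro hok
        have hfv := hok (Or.inl hf1.2)
        rw [fval, hf1.2, pmod2] at hfv
        simp at hfv
        have h0 : nt = 0 := hf1.1
        rcases hsum with h1 | h1 <;> omega
      · rw [if_neg hf1]
        by_cases hf2 : nt = 1 ∧ getCell a (ny + dY d) (nx + dX d) = "."
        · rw [if_pos hf2]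
          left
          refine ⟨rfl, ny + dY d, nx + dX d, hinB, hunv, ?_⟩
          intro hok
          have hfv := hok (Or.inr hf2.2)
          rw [fval, hf2.2, pmod2] at hfv
          simp at hfv
          have h0 : nt = 1 := hf2.1
          rcases hsum with h1 | h1 <;> omega
        · rw [if_neg hf2]
          have hoknew : okb a b (ny + dY d) (nx + dX d) := by
            intro hmk
            rcases hmk with hsharp | hdot
            · have hnt1 : nt = 1 := by
                rcases hnt01 with h | h
                · exact absurd ⟨h, hsharp⟩ hf1
                · exact h
              rw [fval, hsharp, pmod2]
              simp
              rcases hsum with h1 | h1 <;> omega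
            · have hnt0 : nt = 0 := by
                rcases hnt01 with h | h
                · exact h
                · exact absurd ⟨h, hdot⟩ hf2
              rw [fval, hdot, pmod2]
              simp
              rcases hsum with h1 | h1 <;> omega
          have hsh1 : shapeV n m (vset v (ny + dY d) (nx + dX d)) := shapeV_vset n m v _ _ hsh
          have hmono1 : ∀ y' x', 0 ≤ y' → 0 ≤ x' → vget v y' x' = true →
              vget (vset v (ny + dY d) (nx + dX d)) y' x' = true :=
            fun y' x' hy' hx' hv =>
              vget_vset_mono v _ _ _ _ hinB.1 hinB.2.2.1 hy' hx' hunv hv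
          have hvnew : vget (vset v (ny + dY d) (nx + dX d)) (ny + dY d) (nx + dX d) = true :=
            vget_vset_self n m v _ _ hsh hinB
          have hunv1 : ∀ y' x', 0 ≤ y' → 0 ≤ x' →
              vget (vset v (ny + dY d) (nx + dX d)) y' x' = false → vget v y' x' = false := by
            intro y' x' hy' hx' hv1
            by_cases he : ny + dY d = y' ∧ nx + dX d = x'
            · rw [← he.1, ← he.2, hvnew] at hv1
              exact absurd hv1 (by simp)
            · rw [← vget_vset_ne v _ _ y' x' hinB.1 hinB.2.2.1 hy' hx' he]
              exact hv1
          have hq1 : qOK n m b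
              (q ++ [(ny + dY d, nx + dX d, if nt = 0 then 1 else 0)])
              (vset v (ny + dY d) (nx + dX d)) := by
            intro e he
            rcases List.mem_append.mp he with he | he
            · obtain ⟨h1, h2, h3⟩ := hq e he
              exact ⟨h1, hmono1 _ _ h1.1 h1.2.2.1 h2, h3⟩
            · simp only [List.mem_singleton] at he
              subst he
              refine ⟨hinB, hvnew, ?_⟩
              simp only [pmod2]
              rcases hnt01 with h | h <;> rw [h] <;> simp <;>
                (rcases hsum with h1 | h1 <;> omega)
          have hcl1 : ∀ y' x', inB n m y' x' →
              vget (vset v (ny + dY d) (nx + dX d)) y' x' = true →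
              (y' = ny ∧ x' = nx) ∨
              (∃ t, (y', x', t) ∈ q ++ [(ny + dY d, nx + dX d, if nt = 0 then 1 else 0)]) ∨
              nbClosed n m (vset v (ny + dY d) (nx + dX d)) y' x' := by
            intro y' x' hin' hv'
            by_cases he : y' = ny + dY d ∧ x' = nx + dX d
            · right; left
              exact ⟨if nt = 0 then 1 else 0, by rw [he.1, he.2]; simp⟩
            · have hvv : vget v y' x' = true := by
                rw [← vget_vset_ne v _ _ y' x' hinB.1 hinB.2.2.1 hin'.1 hin'.2.2.1
                  (by intro hc; exact he ⟨hc.1.symm, hc.2.symm⟩)]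
                exact hv'
              rcases hcl y' x' hin' hvv with h | ⟨t, ht⟩ | h
              · exact Or.inl h
              · exact Or.inr (Or.inl ⟨t, by simp [ht]⟩)
              · refine Or.inr (Or.inr ?_)
                intro d' hd' hin''
                exact hmono1 _ _ hin''.1 hin''.2.2.1 (h d' hd' hin'')
          have hpend1 : ∀ d' ∈ ([0, 1, 2, 3] : List Int), d' ∉ ds →
              inB n m (ny + dY d') (nx + dX d') →
              vget (vset v (ny + dY d) (nx + dX d)) (ny + dY d') (nx + dX d') = true := by
            intro d' hd' hnot hin'
            by_cases hco : ny + dY d' = ny + dY d ∧ nx + dX d' = nx + dX d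
            · rw [hco.1, hco.2]
              exact hvnew
            · have hda : d' ∉ (d :: ds) := by
                intro hc
                rcases List.mem_cons.mp hc with rfl | hc
                · exact hco ⟨rfl, rfl⟩
                · exact hnot hc
              exact hmono1 _ _ hin'.1 hin'.2.2.1 (hpend d' hd' hda hin')
          have hres := ih (q ++ [(ny + dY d, nx + dX d, if nt = 0 then 1 else 0)])
            (vset v (ny + dY d) (nx + dX d))
            (fun d' hd' => hds d' (by simp [hd'])) hsh1 hq1
            (hmono1 ny nx hny.1 hny.2.2.1 hvny) hcl1 hpend1
          rcases hres with ⟨hnone, yb, xb, hbin, hbug, hbok⟩ |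
            ⟨q', v', heq, hsh', hq', hmono', hcl', hpendF, hunv', hok'⟩
          · left
            exact ⟨hnone, yb, xb, hbin, hunv1 yb xb hbin.1 hbin.2.2.1 hbug, hbok⟩
          · right
            refine ⟨q', v', heq, hsh', hq',
              (fun y' x' hy' hx' hv => hmono' y' x' hy' hx' (hmono1 y' x' hy' hx' hv)),
              hcl', hpendF,
              (fun y' x' hy' hx' hv => hunv1 y' x' hy' hx' (hunv' y' x' hy' hx' hv)), ?_⟩
            intro y' x' hin' hvfalse hvtrue'
            by_cases he : y' = ny + dY d ∧ x' = nx + dX d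
            · rw [he.1, he.2]
              exact hoknew
            · have hv1f : vget (vset v (ny + dY d) (nx + dX d)) y' x' = false := by
                rw [vget_vset_ne v _ _ y' x' hinB.1 hinB.2.2.1 hin'.1 hin'.2.2.1
                  (by intro hc; exact he ⟨hc.1.symm, hc.2.symm⟩)]
                exact hvfalse
              exact hok' y' x' hin' hv1f hvtrue'
    · rw [if_neg hg]
      apply ih q v (fun d' hd' => hds d' (by simp [hd'])) hsh hq hvny hcl
      intro d' hd' hnot hin'
      by_cases hdd : d' = d
      · subst hdd
        have hnf : ¬(vget v (ny + dY d') (nx + dX d') = false) := by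
          intro hE
          exact hg ⟨hin'.1, hin'.2.1, hin'.2.2.1, hin'.2.2.2, hE⟩
        simpa using hnf
      · exact hpend d' hd' (by
          intro hc
          rcases List.mem_cons.mp hc with h | h
          · exact hdd h
          · exact hnot h) hin'

lemma checkGo_main (n m : Int) (a : List (List String)) (b : Int) (hb : 0 ≤ b ∧ b < 2) :
    ∀ (q : List (Int × Int × Int)) (v : List (List Bool)),
    shapeV n m v → qOK n m b q v →
    (∀ y x, inB n m y x → vget v y x = true →
      (∃ t, (y, x, t) ∈ q) ∨ nbClosed n m v y x) →
    (∃ y0 x0, inB n m y0 x0 ∧ vget v y0 x0 = true) →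
    ( (goodV n m a b v →
        ∃ v', checkGo n m a q v = some v' ∧ ∀ y x, inB n m y x → vget v' y x = true)
      ∧ ((∃ y x, inB n m y x ∧ vget v y x = false ∧ ¬ okb a b y x) →
        checkGo n m a q v = none) ) := by
  have hr4 : PySem.List.pyRange 0 4 1 = ([0, 1, 2, 3] : List Int) := by decide
  intro q v
  induction q, v using checkGo.induct n m a with
  | case1 v =>
    intro hsh hq hcl hne
    obtain ⟨y0, x0, h0, hv0⟩ := hne
    have hall : ∀ y x, inB n m y x → vget v y x = true := by
      apply connected n m v ?_ y0 x0 h0 hv0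
      intro y x h1 h2
      rcases hcl y x h1 h2 with ⟨t, ht⟩ | h
      · exact absurd ht (by simp)
      · exact h
    constructor
    · intro _
      exact ⟨v, by simp [checkGo], hall⟩
    · rintro ⟨y, x, hin, hunv, _⟩
      rw [hall y x hin] at hunv
      exact absurd hunv (by simp)
  | case2 ny nx nt rest v h =>
    intro hsh hq hcl hne
    rw [hr4] at h
    obtain ⟨hinh, hvh, hth⟩ := hq (ny, nx, nt) (by simp)
    have hres := dirsLoop_main n m a b ny nx nt hb hinh hth [0, 1, 2, 3] rest v
      (fun d hd => hd) hsh (fun e he => hq e (by simp [he])) hvh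
      (by
        intro y x hin hv
        rcases hcl y x hin hv with ⟨t, ht⟩ | hnb
        · rcases List.mem_cons.mp ht with hh | hh
          · exact Or.inl ⟨by injection hh with e1 e2, by
              injection hh with e1 e2; injection e2 with e3 e4⟩
          · exact Or.inr (Or.inl ⟨t, hh⟩)
        · exact Or.inr (Or.inr hnb))
      (fun d hd hnd _ => absurd hd hnd)
    rcases hres with ⟨_, yb, xb, hbin, hbug, hbok⟩ | ⟨q', v', heq, _⟩
    · have hnone : checkGo n m a ((ny, nx, nt) :: rest) v = none := by
        simp only [checkGo]
        rw [hr4, h]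
      constructor
      · intro hgood
        exact absurd (hgood yb xb hbin hbug) hbok
      · intro _
        exact hnone
    · rw [heq] at h
      exact absurd h (by simp)
  | case3 ny nx nt rest v q1 v1 h ih =>
    intro hsh hq hcl hne
    rw [hr4] at h
    obtain ⟨hinh, hvh, hth⟩ := hq (ny, nx, nt) (by simp)
    have hres := dirsLoop_main n m a b ny nx nt hb hinh hth [0, 1, 2, 3] rest v
      (fun d hd => hd) hsh (fun e he => hq e (by simp [he])) hvh
      (by
        intro y x hin hv
        rcases hcl y x hin hv with ⟨t, ht⟩ | hnb
        · rcases List.mem_cons.mp ht with hh | hh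
          · exact Or.inl ⟨by injection hh with e1 e2, by
              injection hh with e1 e2; injection e2 with e3 e4⟩
          · exact Or.inr (Or.inl ⟨t, hh⟩)
        · exact Or.inr (Or.inr hnb))
      (fun d hd hnd _ => absurd hd hnd)
    rcases hres with ⟨hnone, _⟩ | ⟨q', v', heq, hsh', hq', hmono', hcl', hpendF, hunv', hok'⟩
    · rw [hnone] at h
      exact absurd h (by simp)
    · rw [heq] at h
      injection h with h1
      injection h1 with hq1 hv1
      symm at hq1 hv1
      subst hq1
      subst hv1
      have hstep : checkGo n m a ((ny, nx, nt) :: rest) v = checkGo n m a q1 v1 := by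
        simp only [checkGo]
        rw [hr4, heq]
      have hcl1 : ∀ y x, inB n m y x → vget v1 y x = true →
          (∃ t, (y, x, t) ∈ q1) ∨ nbClosed n m v1 y x := by
        intro y x hin hv
        rcases hcl' y x hin hv with ⟨hy, hx⟩ | h | h
        · subst hy; subst hx
          exact Or.inr (fun d hd hin' => hpendF d hd hin')
        · exact Or.inl h
        · exact Or.inr h
      have hne1 : ∃ y0 x0, inB n m y0 x0 ∧ vget v1 y0 x0 = true :=
        ⟨ny, nx, hinh, hmono' ny nx hinh.1 hinh.2.2.1 hvh⟩
      have IH := ih hsh' hq' hcl1 hne1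
      constructor
      · intro hgood
        have hgood1 : goodV n m a b v1 := by
          intro y x hin hunv1
          exact hgood y x hin (hunv' y x hin.1 hin.2.2.1 hunv1)
        obtain ⟨v'', heq'', hall''⟩ := IH.1 hgood1
        exact ⟨v'', by rw [hstep]; exact heq'', hall''⟩
      · rintro ⟨y, x, hin, hunv, hnok⟩
        rw [hstep]
        apply IH.2
        refine ⟨y, x, hin, ?_, hnok⟩
        cases hv1 : vget v1 y x
        · rfl
        · exact absurd (hok' y x hin hunv hv1) hnok

lemma altLoop_some (a : List (List String)) (b : Int) :
    ∀ cs : List (Int × Int),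
      altLoop a cs (some b) = true ↔
        (∀ c ∈ cs, markedC (getCell a c.1 c.2) → fval a c.1 c.2 = b) := by
  intro cs
  induction cs with
  | nil => simp [altLoop]
  | cons hd cs ih =>
    obtain ⟨i, j⟩ := hd
    by_cases hm : markedC (getCell a i j)
    · have hcond : (getCell a i j = "#" ∨ getCell a i j = ".") := hm
      simp only [altLoop]
      rw [if_pos hcond,
        show PySem.Int.mod (i + j + (if getCell a i j = "." then 1 else 0)) 2 = fval a i j
          from rfl]
      by_cases hbp : b = fval a i j
      · rw [if_neg (by simp [hbp])]
        constructor
        · intro h c hc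
          rcases List.mem_cons.mp hc with rfl | hc
          · intro _; exact hbp.symm
          · exact ih.mp h c hc
        · intro h
          exact ih.mpr (fun c hc => h c (by simp [hc]))
      · rw [if_pos hbp]
        constructor
        · intro h; exact absurd h (by simp)
        · intro hall
          exact absurd ((hall (i, j) (by simp) hm)).symm hbp
    · simp only [altLoop]
      rw [if_neg (by exact hm)]
      constructor
      · intro h c hc
        rcases List.mem_cons.mp hc with rfl | hc
        · intro hmm; exact absurd hmm hm
        · exact ih.mp h c hc
      · intro h
        exact ih.mpr (fun c hc => h c (by simp [hc]))

lemma phase2 (n m : Int) (a : List (List String)) (v : List (List Bool))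
    (hall : ∀ y x, inB n m y x → vget v y x = true) :
    ∀ cs : List (Int × Int), (∀ c ∈ cs, inB n m c.1 c.2) →
      calcLoop n m a cs [] v = true := by
  intro cs
  induction cs with
  | nil => simp [calcLoop]
  | cons hd cs ih =>
    obtain ⟨i, j⟩ := hd
    intro hin
    have hv : vget v i j = true := hall i j (hin (i, j) (by simp))
    simp only [calcLoop]
    rw [if_neg (by simp [hv]), if_neg (by simp [hv])]
    have hck : checkGo n m a [] v = some v := by simp [checkGo]
    simp only [hck]
    exact ih (fun c hc => hin c (by simp [hc]))

lemma phase1 (n m : Int) (a : List (List String)) :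
    ∀ (cs done : List (Int × Int)), cellsOf n m = done ++ cs →
      (∀ c ∈ done, ¬ markedC (getCell a c.1 c.2)) →
      calcLoop n m a cs [] (List.replicate n.toNat (List.replicate m.toNat false)) =
        altLoop a cs none := by
  intro cs
  induction cs with
  | nil => simp [calcLoop, altLoop]
  | cons hd cs ih =>
    obtain ⟨i, j⟩ := hd
    intro done hsplit hdone
    have hmem : (i, j) ∈ cellsOf n m := by rw [hsplit]; simp
    have hin : inB n m i j := (mem_cellsOf n m i j).mp hmem
    have hv0 : vget (List.replicate n.toNat (List.replicate m.toNat false)) i j = false :=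
      vget_replicate n m i j hin
    have hcs : ∀ c ∈ cs, inB n m c.1 c.2 := by
      intro c hc
      have : c ∈ cellsOf n m := by rw [hsplit]; simp [hc]
      obtain ⟨c1, c2⟩ := c
      exact (mem_cellsOf n m c1 c2).mp this
    by_cases hm : markedC (getCell a i j)
    · -- the anchor: seed the BFS / fix the parity class
      have hseed : ∀ t0 b : Int, b = (i + j + (if getCell a i j = "." then 1 else 0)) % 2 →
          t0 = (if getCell a i j = "." then (1 : Int) else 0) →
          (match checkGo n m a [(i, j, t0)]
              (vset (List.replicate n.toNat (List.replicate m.toNat false)) i j) with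
            | none => false
            | some v2 => calcLoop n m a cs [] v2) = altLoop a cs (some b) := by
        intro t0 b hbdef ht0
        have hb : 0 ≤ b ∧ b < 2 := by rw [hbdef]; omega
        have hfvb : fval a i j = b := by rw [fval, pmod2, hbdef]
        set v0 : List (List Bool) := List.replicate n.toNat (List.replicate m.toNat false)
          with hv0def
        have hsh0 : shapeV n m v0 := shapeV_replicate n m
        have hsh1 : shapeV n m (vset v0 i j) := shapeV_vset n m v0 i j hsh0
        have hvnew : vget (vset v0 i j) i j = true := vget_vset_self n m v0 i j hsh0 hin
        have honly : ∀ y x, inB n m y x → vget (vset v0 i j) y x = true → y = i ∧ x = j := by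
          intro y x hin' hv
          by_cases he : i = y ∧ j = x
          · exact ⟨he.1.symm, he.2.symm⟩
          · rw [vget_vset_ne v0 i j y x hin.1 hin.2.2.1 hin'.1 hin'.2.2.1 he,
              vget_replicate n m y x hin'] at hv
            exact absurd hv (by simp)
        have hq1 : qOK n m b [(i, j, t0)] (vset v0 i j) := by
          intro e he
          simp only [List.mem_singleton] at he
          subst he
          refine ⟨hin, hvnew, ?_⟩
          rw [pmod2, ht0, hbdef]
          by_cases hdot : getCell a i j = "."
          · simp only [if_pos hdot]; omega
          · simp only [if_neg hdot]; omega
        have hcl1 : ∀ y x, inB n m y x → vget (vset v0 i j) y x = true →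
            (∃ t, (y, x, t) ∈ [(i, j, t0)]) ∨ nbClosed n m (vset v0 i j) y x := by
          intro y x hin' hv
          obtain ⟨rfl, rfl⟩ := honly y x hin' hv
          exact Or.inl ⟨t0, by simp⟩
        have HM := checkGo_main n m a b hb [(i, j, t0)] (vset v0 i j) hsh1 hq1 hcl1
          ⟨i, j, hin, hvnew⟩
        by_cases hgood : goodV n m a b (vset v0 i j)
        · obtain ⟨v', heq, hall⟩ := HM.1 hgood
          rw [heq]
          show calcLoop n m a cs [] v' = altLoop a cs (some b)
          rw [phase2 n m a v' hall cs hcs]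
          symm
          rw [altLoop_some a b cs]
          intro c hc hcm
          by_cases hcij : c.1 = i ∧ c.2 = j
          · rw [show c.1 = i from hcij.1, show c.2 = j from hcij.2]
            exact hfvb
          · have hcin := hcs c hc
            have hcunv : vget (vset v0 i j) c.1 c.2 = false := by
              cases hvc : vget (vset v0 i j) c.1 c.2
              · rfl
              · exact absurd (honly c.1 c.2 hcin hvc) hcij
            exact hgood c.1 c.2 hcin hcunv hcm
        · unfold goodV at hgood
          push Not at hgood
          obtain ⟨yb, xb, hbin, hbunv, hbnok⟩ := hgood
          have hmarked : markedC (getCell a yb xb) ∧ fval a yb xb ≠ b := by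
            by_cases hmm : markedC (getCell a yb xb)
            · exact ⟨hmm, fun hf => hbnok (fun _ => hf)⟩
            · exact absurd (fun hmm2 => absurd hmm2 hmm) hbnok
          rw [HM.2 ⟨yb, xb, hbin, hbunv, hbnok⟩]
          show (false : Bool) = altLoop a cs (some b)
          symm
          rw [Bool.eq_false_iff]
          intro htrue
          have hall := (altLoop_some a b cs).mp htrue
          have hbmem : (yb, xb) ∈ cellsOf n m := (mem_cellsOf n m yb xb).mpr hbin
          rw [hsplit] at hbmem
          rcases List.mem_append.mp hbmem with hh | hh
          · exact hdone (yb, xb) hh hmarked.1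
          · rcases List.mem_cons.mp hh with hh | hh
            · have : yb = i ∧ xb = j := by
                constructor <;> [exact congrArg Prod.fst hh; exact congrArg (fun p => p.2) hh]
              rw [this.1, this.2] at hbunv
              rw [hvnew] at hbunv
              exact absurd hbunv (by simp)
            · exact hmarked.2 (hall (yb, xb) hh hmarked.1)
      rcases hm with hsharp | hdot
      · simp only [calcLoop, altLoop]
        rw [if_pos ⟨hsharp, hv0⟩, if_pos (Or.inl hsharp)]
        have := hseed 0 ((i + j) % 2) (by rw [hsharp]; simp) (by rw [hsharp]; simp)
        simp only [List.nil_append] at this ⊢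
        rw [show PySem.Int.mod (i + j + (if getCell a i j = "." then 1 else 0)) 2 =
            (i + j) % 2 from by rw [hsharp, pmod2]; simp]
        exact this
      · simp only [calcLoop, altLoop]
        rw [if_neg (by simp [hdot]), if_pos ⟨hdot, hv0⟩, if_pos (Or.inr hdot)]
        have := hseed 1 ((i + j + 1) % 2) (by rw [hdot]; simp) (by rw [hdot]; simp)
        simp only [List.nil_append] at this ⊢
        rw [show PySem.Int.mod (i + j + (if getCell a i j = "." then 1 else 0)) 2 =
            (i + j + 1) % 2 from by rw [hdot, pmod2]; simp]
        exact this
    · -- not an anchor cell: nothing happens on either side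
      have hm1 : ¬(getCell a i j = "#" ∧
          vget (List.replicate n.toNat (List.replicate m.toNat false)) i j = false) := by
        intro hc
        exact hm (Or.inl hc.1)
      have hm2 : ¬(getCell a i j = "." ∧
          vget (List.replicate n.toNat (List.replicate m.toNat false)) i j = false) := by
        intro hc
        exact hm (Or.inr hc.1)
      simp only [calcLoop, altLoop]
      rw [if_neg hm1, if_neg hm2,
        if_neg (show ¬(getCell a i j = "#" ∨ getCell a i j = ".") from hm)]
      have hck : checkGo n m a []
          (List.replicate n.toNat (List.replicate m.toNat false)) =
          some (List.replicate n.toNat (List.replicate m.toNat false)) := by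
        simp [checkGo]
      show (match checkGo n m a [] (List.replicate n.toNat (List.replicate m.toNat false)) with
        | none => false
        | some v2 => calcLoop n m a cs [] v2) = altLoop a cs none
      rw [hck]
      exact ih (done ++ [(i, j)]) (by rw [hsplit]; simp) (by
        intro c hc
        rcases List.mem_append.mp hc with hh | hh
        · exact hdone c hh
        · simp only [List.mem_singleton] at hh
          subst hh
          exact hm)

-- ===== VERDICT =====
theorem calc_py_spec : Claim_equal_calc_py := by
  intro n m a _hdom _hpre
  unfold Spec_calc_py calc_py calc_py_alt
  rw [show (List.range n.toNat).map (fun _ => List.replicate m.toNat false) =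
      List.replicate n.toNat (List.replicate m.toNat false) from by
    rw [List.map_const']; simp]
  exact phase1 n m a (cellsOf n m) [] rfl (by simp)
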